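-- pv_equiv track=rewrite | github.com/RampageousRJ/CCE-DMPA-Lab | Lab7/apriori.py | pruneFreqSet
-- ===== SOURCE A (Python) =====
-- from itertools import combinations,permutations
--
-- def checkSubset(sset,set):
--     if len(sset) > len(set):
--         return False
--     newSet = []
--     for num,item in enumerate(list(permutations(set))):
--         newSet.append(''.join(list(item)))
--     for itemset in newSet:
--         if sset in itemset:
--             return True
--     return False
--
-- def pruneFreqSet(freqSet):
--     rm_arr = []
--     for i in freqSet.keys():
--         newSet_keys = list(freqSet.keys())
--         newSet_keys.remove(i)
--         for j in newSet_keys: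
--             if checkSubset(i,j):
--                 rm_arr.append(i)
--     for i in rm_arr:
--         freqSet.pop(i)
--     return freqSet
-- ===== SOURCE B (Python) =====
-- from collections import Counter
--
-- def pruneFreqSet(freqSet):
--     # Multiset-containment test instead of A's "substring of some permutation":
--     # i can be pruned by j iff every character of i occurs in j at least as often.
--     def submultiset(i, j):
--         ci, cj = Counter(i), Counter(j)
--         return all(n <= cj[c] for c, n in ci.items())
--     removed = [i for i in freqSet
--                if any(j != i and submultiset(i, j) for j in freqSet)]
--     for i in removed:
--         del freqSet[i]
--     return freqSet
-- ===== Notes on version B (the rewrite author's own statement) =====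
-- stated objective: faster
-- what changed: A tests whether one key can absorb another by materialising every permutation of the longer key and doing a substring search in each; B replaces that with a direct Counter sub-multiset comparison, which is the same predicate without enumerating permutations, and collects each removable key once.
import Mathlib
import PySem

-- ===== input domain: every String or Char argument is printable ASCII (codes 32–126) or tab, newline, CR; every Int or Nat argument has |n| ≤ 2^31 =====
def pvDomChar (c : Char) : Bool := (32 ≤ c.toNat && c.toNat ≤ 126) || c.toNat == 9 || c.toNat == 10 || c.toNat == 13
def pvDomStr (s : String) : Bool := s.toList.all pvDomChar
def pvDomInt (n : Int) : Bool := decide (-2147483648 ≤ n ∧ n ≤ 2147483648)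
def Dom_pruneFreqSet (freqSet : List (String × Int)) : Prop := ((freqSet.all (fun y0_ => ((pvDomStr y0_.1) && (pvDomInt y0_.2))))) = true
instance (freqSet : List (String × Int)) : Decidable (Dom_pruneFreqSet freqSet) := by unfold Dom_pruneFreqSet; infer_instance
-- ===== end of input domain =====

-- B replaces A's "substring of some permutation" test by a direct Counter sub-multiset
-- comparison (objective: faster; no permutation enumeration). A mutates its dict argument in
-- place (pop); the equivalence proved here is about the RETURN value only.

-- ===== PORT A =====
-- checkSubset(sset, set): the newSet list built by the first loop is the map over all
-- permutations; the second loop with early return True is the any.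
def checkSubset (sset set : String) : Bool :=
  if sset.toList.length > set.toList.length then false
  else
    ((PySem.List.permutations set.toList set.toList.length).map
        (fun item => String.ofList item)).any
      (fun itemset => PySem.Str.isIn sset itemset)

def pruneFreqSet (freqSet : List (String × Int)) : List (String × Int) :=
  -- freqSet.pop(i): the KeyError case (pop? = none) is excluded by Pre_pruneFreqSet
  (((PySem.Dict.mk freqSet).keys.foldl
      (fun rm i =>
        ((PySem.List.remove? (PySem.Dict.mk freqSet).keys i).getD
            (PySem.Dict.mk freqSet).keys).foldl
          (fun rm j => if checkSubset i j then rm ++ [i] else rm) rm)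
      []).foldl
    (fun d i => match PySem.Dict.pop? d i with | some r => r.2 | none => d)
    (PySem.Dict.mk freqSet)).items

-- ===== PORT B =====
-- submultiset(i, j) of Source B: Counter comparison, all counts of i bounded by counts in j
def submultisetB (i j : String) : Bool :=
  (PySem.Dict.counter i.toList).items.all
    (fun p => p.2 ≤ (PySem.Dict.counter j.toList).getD p.1 0)

def pruneFreqSet_alt (freqSet : List (String × Int)) : List (String × Int) :=
  (((PySem.Dict.mk freqSet).keys.filter
      (fun i => (PySem.Dict.mk freqSet).keys.any (fun j => j != i && submultisetB i j))).foldl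
    (fun acc i => acc.erase i) (PySem.Dict.mk freqSet)).items

-- ===== PRECONDITION & SPEC =====
-- character-multiset containment, used only to state the precondition
def msub (i j : String) : Bool := i.toList.all (fun c => i.toList.count c ≤ j.toList.count c)

-- Pre_ excludes (a) lists with repeated keys, which are not the image of a Python dict, and
-- (b) dicts where some key is a character-sub-multiset of two or more other keys: there A
-- appends that key to rm_arr twice and the second freqSet.pop(i) raises KeyError.
def Pre_pruneFreqSet (freqSet : List (String × Int)) : Prop :=
  (freqSet.map Prod.fst).Nodup ∧
  ∀ i ∈ freqSet.map Prod.fst,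
    ((freqSet.map Prod.fst).filter (fun j => j != i && msub i j)).length ≤ 1
instance (freqSet : List (String × Int)) : Decidable (Pre_pruneFreqSet freqSet) := by
  unfold Pre_pruneFreqSet; infer_instance

def pvWitness_pruneFreqSet : (List (String × Int)) := [("a", 1), ("ab", 2), ("cd", 3)]

def Spec_pruneFreqSet (freqSet : List (String × Int)) (out : List (String × Int)) : Prop := out = pruneFreqSet_alt freqSet
instance (freqSet : List (String × Int)) (out : List (String × Int)) : Decidable (Spec_pruneFreqSet freqSet out) := by unfold Spec_pruneFreqSet; infer_instance

-- ===== CLAIM (what is proved, stated in full; the proofs are below) =====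
def Claim_equal_pruneFreqSet : Prop := ∀ (freqSet : List (String × Int)), Dom_pruneFreqSet freqSet → Pre_pruneFreqSet freqSet → Spec_pruneFreqSet freqSet (pruneFreqSet freqSet)

-- ===== LEMMAS AND PROOFS =====

-- unfolding of PySem.List.permutations at a successor length
theorem permutations_succ {α : Type} (xs : List α) (r : Nat) :
    PySem.List.permutations xs (r + 1) =
      (List.range xs.length).flatMap (fun i =>
        match xs[i]? with
        | none => []
        | some a => (PySem.List.permutations (xs.eraseIdx i) r).map (fun p => a :: p)) := rfl

-- completeness of PySem.List.permutations: every rearrangement of xs occurs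
theorem mem_permutations_of_perm {α : Type} (p xs : List α) (h : p.Perm xs) :
    p ∈ PySem.List.permutations xs xs.length := by
  induction p generalizing xs with
  | nil =>
    have hxs : xs = [] := h.symm.eq_nil
    subst hxs
    simp [PySem.List.permutations_zero]
  | cons a p ih =>
    have ha : a ∈ xs := h.subset (List.mem_cons_self ..)
    obtain ⟨n, hn, hx⟩ := List.getElem_of_mem ha
    have hlen : xs.length = p.length + 1 := by simpa using h.length_eq.symm
    rw [hlen, permutations_succ]
    apply List.mem_flatMap.mpr
    have hget : xs[n]? = some a := by rw [List.getElem?_eq_getElem hn, hx]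
    refine ⟨n, List.mem_range.mpr hn, ?_⟩
    rw [hget]
    have hperm : p.Perm (xs.eraseIdx n) := by
      have h2 : (a :: xs.eraseIdx n).Perm xs := PySem.List.perm_cons_eraseIdx xs hget
      exact (h.trans h2.symm).cons_inv
    have hlen2 : (xs.eraseIdx n).length = p.length := by
      rw [List.length_eraseIdx]
      simp only [hn, if_pos]
      omega
    have hmem := ih (xs.eraseIdx n) hperm
    rw [hlen2] at hmem
    exact List.mem_map.mpr ⟨p, hmem, rfl⟩

theorem checkSubset_iff (i j : String) :
    checkSubset i j = true ↔ i.toList.Subperm j.toList := by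
  unfold checkSubset
  split_ifs with hlen
  · simp only [false_iff]
    intro hsub
    have := hsub.length_le
    omega
  · simp only [List.any_eq_true, List.mem_map]
    constructor
    · rintro ⟨s, ⟨perm, hmem, rfl⟩, hin⟩
      have hinf := (PySem.Str.isIn_iff_infix _ _).mp hin
      rw [String.toList_ofList] at hinf
      have hperm := PySem.List.perm_of_mem_permutations hmem
      exact hinf.sublist.subperm.trans hperm.subperm
    · intro hsub
      obtain ⟨l, h1, h2⟩ := hsub
      obtain ⟨t, ht⟩ := h2.exists_perm_append
      have hpt : (i.toList ++ t).Perm j.toList := (ht.trans (h1.append_right t)).symm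
      refine ⟨String.ofList (i.toList ++ t),
        ⟨i.toList ++ t, mem_permutations_of_perm _ _ hpt, rfl⟩, ?_⟩
      rw [PySem.Str.isIn_iff_infix, String.toList_ofList]
      exact (List.prefix_append i.toList t).isInfix

theorem submultisetB_iff (i j : String) :
    submultisetB i j = true ↔ i.toList.Subperm j.toList := by
  unfold submultisetB
  rw [List.subperm_ext_iff]
  simp only [List.all_eq_true, PySem.Dict.items_counter, List.mem_map, decide_eq_true_eq]
  constructor
  · intro h c hc
    have h2 : ((i.toList.count c : Int)) ≤ (PySem.Dict.counter j.toList).getD c 0 :=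
      h (c, (i.toList.count c : Int)) ⟨c, (PySem.Set.mem_ofList _ _).mpr hc, rfl⟩
    rw [PySem.Dict.getD_counter] at h2
    exact_mod_cast h2
  · rintro h p ⟨c, hc, rfl⟩
    show ((i.toList.count c : Int)) ≤ (PySem.Dict.counter j.toList).getD c 0
    rw [PySem.Dict.getD_counter]
    exact_mod_cast h c ((PySem.Set.mem_ofList _ _).mp hc)

theorem msub_iff (i j : String) :
    msub i j = true ↔ i.toList.Subperm j.toList := by
  unfold msub
  rw [List.subperm_ext_iff]
  simp [List.all_eq_true]

theorem checkSubset_eq_msub (i j : String) : checkSubset i j = msub i j := by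
  have h1 := checkSubset_iff i j
  have h2 := msub_iff i j
  cases hc : checkSubset i j <;> cases hm : msub i j <;> simp_all

theorem submultisetB_eq_msub (i j : String) : submultisetB i j = msub i j := by
  have h1 := submultisetB_iff i j
  have h2 := msub_iff i j
  cases hc : submultisetB i j <;> cases hm : msub i j <;> simp_all

-- the outer loop of A: each key i contributes one copy of i per pruning witness j
theorem loopA (ks : List String) :
    ∀ (l : List String) (acc : List String), (∀ i ∈ l, i ∈ ks) →
    l.foldl (fun rm i =>
        ((PySem.List.remove? ks i).getD ks).foldl
          (fun rm j => if checkSubset i j then rm ++ [i] else rm) rm) acc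
      = acc ++ l.flatMap (fun i =>
          ((ks.erase i).filter (fun j => checkSubset i j)).map (fun _ => i)) := by
  intro l
  induction l with
  | nil => simp
  | cons x l ih =>
    intro acc h
    simp only [List.foldl_cons, List.flatMap_cons]
    rw [PySem.List.remove?_eq_some_erase ks x (h x (List.mem_cons_self ..)), Option.getD_some,
      PySem.List.foldl_append_if (fun j => checkSubset x j) (fun _ => x) (ks.erase x) acc,
      ih _ (fun i hi => h i (List.mem_cons_of_mem _ hi))]
    rw [List.append_assoc]

theorem flatMap_eq_filter {α : Type} (P : α → Bool) (g : α → List α) :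
    ∀ l : List α, (∀ i ∈ l, g i = if P i then [i] else []) → l.flatMap g = l.filter P := by
  intro l
  induction l with
  | nil => simp
  | cons x l ih =>
    intro h
    simp only [List.flatMap_cons, List.filter_cons, h x (List.mem_cons_self ..)]
    rw [ih (fun i hi => h i (List.mem_cons_of_mem _ hi))]
    split <;> simp

theorem mem_keys_erase_of_ne {d : PySem.Dict String Int} {i x : String}
    (hne : i ≠ x) (hi : i ∈ d.keys) : i ∈ (d.erase x).keys := by
  simp only [PySem.Dict.keys, PySem.Dict.erase, List.mem_map, List.mem_filter] at *
  obtain ⟨p, hp, rfl⟩ := hi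
  exact ⟨p, ⟨hp, by simp [hne]⟩, rfl⟩

theorem fold_pop_eq_fold_erase :
    ∀ (rm : List String) (d : PySem.Dict String Int),
    rm.Nodup → (∀ i ∈ rm, i ∈ d.keys) →
    rm.foldl (fun d i => match PySem.Dict.pop? d i with | some r => r.2 | none => d) d
      = rm.foldl (fun acc i => acc.erase i) d := by
  intro rm
  induction rm with
  | nil => intro d _ _; rfl
  | cons x rm ih =>
    intro d hnd hmem
    have hx : x ∈ d.keys := hmem x (List.mem_cons_self ..)
    have hc : d.contains x = true := (PySem.Dict.contains_iff_mem_keys d x).mpr hx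
    rw [PySem.Dict.contains_eq_isSome_get?] at hc
    obtain ⟨v, hv⟩ := Option.isSome_iff_exists.mp hc
    have hstep : (match PySem.Dict.pop? d x with | some r => r.2 | none => d) = d.erase x := by
      simp [PySem.Dict.pop?, hv]
    simp only [List.foldl_cons, hstep]
    apply ih (d.erase x) hnd.of_cons
    intro i hi
    have hne : i ≠ x := by
      rintro rfl
      exact (List.nodup_cons.mp hnd).1 hi
    exact mem_keys_erase_of_ne hne (hmem i (List.mem_cons_of_mem _ hi))

-- ===== VERDICT (by name: the statement is the Claim_ definition above) =====
theorem pruneFreqSet_spec : Claim_equal_pruneFreqSet := by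
  intro freqSet _hDom hPre
  obtain ⟨hnd, hbd⟩ := hPre
  unfold Spec_pruneFreqSet pruneFreqSet pruneFreqSet_alt
  have hkeys : (PySem.Dict.mk freqSet).keys = freqSet.map Prod.fst :=
    PySem.Dict.keys_mk freqSet
  rw [hkeys]
  set ks := freqSet.map Prod.fst with hksdef
  -- characterise A's rm_arr
  rw [loopA ks ks [] (fun i hi => hi), List.nil_append]
  -- each key's contribution is [i] or [], governed by B's predicate
  have hg : ∀ i ∈ ks,
      ((ks.erase i).filter (fun j => checkSubset i j)).map (fun _ => i)
        = if ks.any (fun j => j != i && submultisetB i j) then [i] else [] := by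
    intro i hi
    have hfe : (ks.erase i).filter (fun j => checkSubset i j)
        = ks.filter (fun j => j != i && msub i j) := by
      rw [hnd.erase_eq_filter i, List.filter_filter]
      apply List.filter_congr
      intro j _
      simp [checkSubset_eq_msub, Bool.and_comm]
    have hanyiff : ks.any (fun j => j != i && submultisetB i j) = true
        ↔ ks.filter (fun j => j != i && msub i j) ≠ [] := by
      rw [List.any_eq_true]
      constructor
      · rintro ⟨j, hj, hcond⟩
        have hcond' : (j != i && msub i j) = true := by
          rw [← submultisetB_eq_msub]; exact hcond
        intro hF
        have hjF : j ∈ List.filter (fun j => j != i && msub i j) ks :=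
          List.mem_filter.mpr ⟨hj, hcond'⟩
        rw [hF] at hjF
        exact absurd hjF (List.not_mem_nil)
      · intro hne
        obtain ⟨j, hjF⟩ := List.exists_mem_of_ne_nil _ hne
        obtain ⟨hj, hcond⟩ := List.mem_filter.mp hjF
        exact ⟨j, hj, by rw [submultisetB_eq_msub]; exact hcond⟩
    rw [hfe]
    rcases hF : ks.filter (fun j => j != i && msub i j) with _ | ⟨y, F'⟩
    · rw [if_neg (by rw [hanyiff, hF]; simp)]
      simp
    · have hb := hbd i hi
      rw [hF] at hb
      have hF' : F' = [] := by
        cases F' with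
        | nil => rfl
        | cons z F'' => simp at hb
      subst hF'
      rw [if_pos (hanyiff.mpr (by rw [hF]; simp))]
      simp
  rw [flatMap_eq_filter _ _ ks hg]
  -- the final removal pass: pop (present) = erase
  rw [fold_pop_eq_fold_erase _ (PySem.Dict.mk freqSet)
    (hnd.filter _) (fun i hi => by rw [hkeys]; exact (List.mem_filter.mp hi).1)]
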